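-- pv_equiv track=rewrite | github.com/xavicci/estructura_algoritmos | 01-ESTRUCTURA_ALGORITMOS/Complejidad Lineal/estructuras.py | complejidad_lineal
-- ===== SOURCE A (Python) =====
-- def complejidad_lineal (lista):
--     suma=0
--     mult=1
--
--     for num in range (len(lista)):
--         suma +=num
--
--     for num in range (len(lista)):
--         mult *=num
--
--     return suma,mult
-- ===== SOURCE B (Python) =====
-- def complejidad_lineal(lista):
--     n = len(lista)
--     return n * (n - 1) // 2, (1 if n == 0 else 0)
-- ===== Notes on version B (the rewrite author's own statement) =====
-- stated objective: faster
-- what changed: Replaced the two O(n) loops over range(len(lista)) by closed forms: the Gauss sum n(n-1)//2 and a product that is 1 for empty input and 0 otherwise (range includes 0).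
import Mathlib
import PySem

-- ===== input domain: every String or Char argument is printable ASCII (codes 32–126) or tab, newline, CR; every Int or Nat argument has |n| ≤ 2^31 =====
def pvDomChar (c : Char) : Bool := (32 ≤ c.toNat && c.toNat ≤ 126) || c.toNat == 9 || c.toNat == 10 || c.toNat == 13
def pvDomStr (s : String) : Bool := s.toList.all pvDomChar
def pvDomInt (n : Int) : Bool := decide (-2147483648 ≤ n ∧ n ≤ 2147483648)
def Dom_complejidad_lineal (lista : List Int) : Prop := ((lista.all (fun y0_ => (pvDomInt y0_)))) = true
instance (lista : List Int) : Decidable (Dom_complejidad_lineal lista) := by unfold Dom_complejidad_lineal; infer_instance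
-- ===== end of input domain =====

-- B replaces the two O(n) loops by closed forms (Gauss sum; product is 0 unless the list is empty): O(1) instead of O(n).

-- ===== PORT A =====
def complejidad_lineal (lista : List Int) : List Int :=
  let suma : Int := (PySem.List.pyRange 0 (lista.length : Int) 1).foldl (fun s num => s + num) 0
  let mult : Int := (PySem.List.pyRange 0 (lista.length : Int) 1).foldl (fun m num => m * num) 1
  [suma, mult]

-- ===== PORT B =====
def complejidad_lineal_alt (lista : List Int) : List Int :=
  let n : Int := lista.length
  [PySem.Int.floordiv (n * (n - 1)) 2, if n == 0 then 1 else 0]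

-- ===== PRECONDITION & SPEC =====
def Spec_complejidad_lineal (lista : List Int) (out : List Int) : Prop := out = complejidad_lineal_alt lista
instance (lista : List Int) (out : List Int) : Decidable (Spec_complejidad_lineal lista out) := by unfold Spec_complejidad_lineal; infer_instance

-- ===== CLAIM (what is proved, stated in full; the proofs are below) =====
def Claim_equal_complejidad_lineal : Prop := ∀ (lista : List Int), Dom_complejidad_lineal lista → Spec_complejidad_lineal lista (complejidad_lineal lista)

-- ===== LEMMAS AND PROOFS =====

-- sum of range(n): twice the fold equals n(n-1)
lemma pv_sum_range (n : Nat) :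
    2 * (PySem.List.pyRange 0 (n : Int) 1).foldl (fun s num => s + num) 0
      = (n : Int) * ((n : Int) - 1) := by
  induction n with
  | zero => simp [PySem.List.pyRange_one_eq_nil]
  | succ m ih =>
      have h : ((m + 1 : Nat) : Int) = (m : Int) + 1 := by push_cast; ring
      rw [h, PySem.List.pyRange_one_succ_right (by positivity)]
      simp only [List.foldl_append, List.foldl_cons, List.foldl_nil]
      linear_combination ih

-- product of range(n): 1 if n = 0, else 0 (0 is a factor)
lemma pv_prod_range (n : Nat) :
    (PySem.List.pyRange 0 (n : Int) 1).foldl (fun m num => m * num) 1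
      = if (n : Int) == 0 then (1 : Int) else 0 := by
  induction n with
  | zero => simp [PySem.List.pyRange_one_eq_nil]
  | succ m ih =>
      have h : ((m + 1 : Nat) : Int) = (m : Int) + 1 := by push_cast; ring
      rw [h, PySem.List.pyRange_one_succ_right (by positivity)]
      simp only [List.foldl_append, List.foldl_cons, List.foldl_nil]
      cases m with
      | zero => simp [PySem.List.pyRange_one_eq_nil]
      | succ k =>
          rw [ih]
          have h1 : ((k : Int) + 1) ≠ 0 := by positivity
          have h2 : ((k : Int) + 1 + 1) ≠ 0 := by positivity
          push_cast
          simp [h1, h2]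

-- ===== VERDICT (by name: the statement is the Claim_ definition above) =====
theorem complejidad_lineal_spec : Claim_equal_complejidad_lineal := by
  intro lista _
  unfold Spec_complejidad_lineal complejidad_lineal complejidad_lineal_alt
  simp only []
  have hs := pv_sum_range lista.length
  have hp := pv_prod_range lista.length
  rw [hp]
  congr 1
  have h2 : (2 : Int) ≠ 0 := by norm_num
  have : (lista.length : Int) * ((lista.length : Int) - 1)
      = 2 * (PySem.List.pyRange 0 (lista.length : Int) 1).foldl (fun s num => s + num) 0 := hs.symm
  rw [this, PySem.Int.floordiv_eq_ediv_of_pos (by norm_num), Int.mul_ediv_cancel_left _ h2]
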